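-- pv_equiv track=rewrite | github.com/NVIDIA/srt-slurm | src/srtctl/core/fingerprint.py | _ordered_fingerprint
-- ===== SOURCE A (Python) =====
-- from typing import Any
--
-- _FIELD_ORDER = [
--     # Identity
--     "hostname",
--     "timestamp",
--     # Hardware + OS
--     "arch",
--     "os",
--     "gpu",
--     # Core versions
--     "python_version",
--     "cuda_version",
--     "torch_version",
--     "nccl_version",
--     # Full package list (always last)
--     "pip_packages",
-- ]
--
-- def _ordered_fingerprint(data: dict[str, Any]) -> dict[str, Any]:
--     """Reorder fingerprint dict to canonical field order."""
--     ordered: dict[str, Any] = {}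
--     for key in _FIELD_ORDER:
--         if key in data:
--             ordered[key] = data[key]
--     # Append any extra keys alphabetically
--     for key in sorted(data.keys()):
--         if key not in ordered:
--             ordered[key] = data[key]
--     return ordered
-- ===== SOURCE B (Python) =====
-- _FIELD_ORDER = [
--     "hostname",
--     "timestamp",
--     "arch",
--     "os",
--     "gpu",
--     "python_version",
--     "cuda_version",
--     "torch_version",
--     "nccl_version",
--     "pip_packages",
-- ]
--
-- def _ordered_fingerprint(data):
--     """Reorder fingerprint dict to canonical field order (single sort with a composite key)."""
--     rank = {name: i for i, name in enumerate(_FIELD_ORDER)}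
--     n = len(_FIELD_ORDER)
--     return {k: data[k] for k in sorted(data, key=lambda k: (rank[k], "") if k in rank else (n, k))}
-- ===== Notes on version B (the rewrite author's own statement) =====
-- stated objective: idiomatic
-- what changed: Replaces A's two sequential build-up loops (fixed-order pass over _FIELD_ORDER, then a sorted pass over the remaining keys) with one sort of all keys under a composite (rank, name) key and a single dict comprehension.
import Mathlib
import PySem

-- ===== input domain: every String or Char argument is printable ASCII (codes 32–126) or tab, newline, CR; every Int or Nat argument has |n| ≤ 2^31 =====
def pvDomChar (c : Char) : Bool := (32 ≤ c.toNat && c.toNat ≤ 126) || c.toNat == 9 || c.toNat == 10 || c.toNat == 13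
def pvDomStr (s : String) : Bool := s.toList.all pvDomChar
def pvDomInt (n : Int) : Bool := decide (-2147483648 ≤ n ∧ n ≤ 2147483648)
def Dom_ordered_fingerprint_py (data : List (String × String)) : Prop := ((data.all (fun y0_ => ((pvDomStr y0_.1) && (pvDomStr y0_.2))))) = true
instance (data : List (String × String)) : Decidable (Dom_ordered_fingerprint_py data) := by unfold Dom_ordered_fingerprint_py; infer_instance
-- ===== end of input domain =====

-- B reorders the dict with ONE sort of all keys under a composite (rank, name) key instead of
-- A's two sequential build-up loops; objective: idiomatic, same cost.

-- ===== PORT A =====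
def pvFieldOrder : List String :=
  ["hostname", "timestamp", "arch", "os", "gpu", "python_version",
   "cuda_version", "torch_version", "nccl_version", "pip_packages"]

def ordered_fingerprint_py (data : List (String × String)) : List (String × String) :=
  let d := PySem.Dict.ofList data
  let ordered :=
    pvFieldOrder.foldl
      (fun o key => if d.contains key then o.insert key (d.getD key "") else o)
      PySem.Dict.empty
  let ordered :=
    (PySem.List.sorted d.keys (fun k => k) false).foldl
      (fun o key => if o.contains key then o else o.insert key (d.getD key "")) ordered
  ordered.items

-- ===== PORT B =====
-- rank = {name: i for i, name in enumerate(_FIELD_ORDER)}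
def pvRank : PySem.Dict String Int :=
  (PySem.List.enumerate pvFieldOrder).foldl
    (fun r p => r.insert p.2 p.1) PySem.Dict.empty

def ordered_fingerprint_py_alt (data : List (String × String)) : List (String × String) :=
  let d := PySem.Dict.ofList data
  let n : Int := (pvFieldOrder.length : Int)
  -- sorted(data, key=lambda k: (rank[k], "") if k in rank else (n, k)) — tuple key via sorted2
  let ks := PySem.List.sorted2 d.keys
      (fun k => if pvRank.contains k then pvRank.getD k 0 else n)
      (fun k => if pvRank.contains k then "" else k) false
  (ks.foldl (fun o k => o.insert k (d.getD k "")) PySem.Dict.empty).items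

-- ===== PRECONDITION & SPEC =====
def Spec_ordered_fingerprint_py (data : List (String × String)) (out : List (String × String)) : Prop := out = ordered_fingerprint_py_alt data
instance (data : List (String × String)) (out : List (String × String)) : Decidable (Spec_ordered_fingerprint_py data out) := by unfold Spec_ordered_fingerprint_py; infer_instance

-- ===== CLAIM (what is proved, stated in full; the proofs are below) =====
def Claim_equal_ordered_fingerprint_py : Prop := ∀ (data : List (String × String)), Dom_ordered_fingerprint_py data → Spec_ordered_fingerprint_py data (ordered_fingerprint_py data)

-- ===== LEMMAS AND PROOFS =====

-- the composite sort key of B, as a single lexicographic key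
def pvKeyB (k : String) : Lex (Int × String) :=
  toLex ((if pvRank.contains k then pvRank.getD k 0 else (pvFieldOrder.length : Int)),
         (if pvRank.contains k then "" else k))

-- sorted2 is sorted under the lexicographic product key
theorem pv_sorted2_eq_sorted_lex {α : Type} (xs : List α) (k1 : α → Int) (k2 : α → String) :
    PySem.List.sorted2 xs k1 k2 false
      = PySem.List.sorted xs (fun x => toLex (k1 x, k2 x)) false := by
  rw [PySem.List.sorted_eq_foldl_insertBy]
  show List.foldl (fun acc x => PySem.List.insertBy
      (fun a b => decide (k1 a < k1 b) || (!decide (k1 b < k1 a) && decide (k2 a < k2 b))) x acc) [] xs = _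
  have hfun : (fun (a b : α) => decide (k1 a < k1 b) || (!decide (k1 b < k1 a) && decide (k2 a < k2 b)))
      = fun a b => decide (toLex (k1 a, k2 a) < toLex (k1 b, k2 b)) := by
    funext a b
    rcases lt_trichotomy (k1 a) (k1 b) with h | h | h
    · simp [Prod.Lex.toLex_lt_toLex, h]
    · simp [Prod.Lex.toLex_lt_toLex, h]
    · have h1 : ¬ k1 a < k1 b := not_lt.mpr h.le
      have h2 : k1 a ≠ k1 b := h.ne'
      simp [Prod.Lex.toLex_lt_toLex, h1, h2]
      exact fun hle => absurd (lt_of_le_of_ne hle h2) h1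
  rw [hfun]

-- a dict whose items are (k, val k) over distinct keys S, extended by inserting (k, val k):
-- the items become (S.update ys).map (k ↦ (k, val k))
theorem pv_items_foldl_insert (val : String → String) (ys : List String) :
    ∀ (S : List String) (o : PySem.Dict String String), S.Nodup →
      o.items = S.map (fun k => (k, val k)) →
      (ys.foldl (fun o k => o.insert k (val k)) o).items
        = (PySem.Set.update S ys).map (fun k => (k, val k)) := by
  induction ys with
  | nil => intro S o _ ho; simpa [PySem.Set.update_nil] using ho
  | cons k ys ih =>
    intro S o hS ho
    have hkeys : o.keys = S := by
      simp [PySem.Dict.keys, ho, Function.comp_def]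
    by_cases hk : k ∈ S
    · have hcont : o.contains k = true := (PySem.Dict.contains_iff_mem_keys o k).2 (hkeys ▸ hk)
      have hins : o.insert k (val k) = o := by
        apply PySem.Dict.ext
        rw [PySem.Dict.items_insert_of_contains _ _ hcont, ho]
        rw [List.map_map]
        refine List.map_congr_left ?_
        intro s _
        by_cases hsk : s = k
        · subst hsk; simp
        · simp [Function.comp, hsk]
      simp only [List.foldl_cons, hins, PySem.Set.update_cons, PySem.Set.add_of_mem hk]
      exact ih S o hS ho
    · have hcont : o.contains k = false := by
        cases hco : o.contains k
        · rfl
        · exact absurd (hkeys ▸ (PySem.Dict.contains_iff_mem_keys o k).1 hco) hk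
      have hitems : (o.insert k (val k)).items = (S ++ [k]).map (fun k => (k, val k)) := by
        rw [PySem.Dict.items_insert_of_not_contains _ _ hcont, ho]; simp
      simp only [List.foldl_cons, PySem.Set.update_cons, PySem.Set.add_of_not_mem hk]
      exact ih (S ++ [k]) _ (by
        rw [List.nodup_append]
        refine ⟨hS, List.nodup_singleton _, ?_⟩
        intro a ha b hb heq
        exact hk ((heq.trans (List.mem_singleton.mp hb)) ▸ ha)) hitems

-- same, with A's guarded insert
theorem pv_items_foldl_insert_cond (val : String → String) (ys : List String) :
    ∀ (S : List String) (o : PySem.Dict String String), S.Nodup →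
      o.items = S.map (fun k => (k, val k)) →
      (ys.foldl (fun o k => if o.contains k then o else o.insert k (val k)) o).items
        = (PySem.Set.update S ys).map (fun k => (k, val k)) := by
  induction ys with
  | nil => intro S o _ ho; simpa [PySem.Set.update_nil] using ho
  | cons k ys ih =>
    intro S o hS ho
    have hkeys : o.keys = S := by
      simp [PySem.Dict.keys, ho, Function.comp_def]
    by_cases hk : k ∈ S
    · have hcont : o.contains k = true := (PySem.Dict.contains_iff_mem_keys o k).2 (hkeys ▸ hk)
      simp only [List.foldl_cons, hcont, if_true, PySem.Set.update_cons, PySem.Set.add_of_mem hk]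
      exact ih S o hS ho
    · have hcont : o.contains k = false := by
        cases hco : o.contains k
        · rfl
        · exact absurd (hkeys ▸ (PySem.Dict.contains_iff_mem_keys o k).1 hco) hk
      have hitems : (o.insert k (val k)).items = (S ++ [k]).map (fun k => (k, val k)) := by
        rw [PySem.Dict.items_insert_of_not_contains _ _ hcont, ho]; simp
      simp only [List.foldl_cons, hcont, PySem.Set.update_cons, PySem.Set.add_of_not_mem hk]
      exact ih (S ++ [k]) _ (by
        rw [List.nodup_append]
        refine ⟨hS, List.nodup_singleton _, ?_⟩
        intro a ha b hb heq
        exact hk ((heq.trans (List.mem_singleton.mp hb)) ▸ ha)) hitems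

theorem pv_ofList_sublist {α : Type} [BEq α] [LawfulBEq α] (xs : List α) :
    (PySem.Set.ofList xs).Sublist xs := by
  induction xs with
  | nil => simp [PySem.Set.ofList_nil]
  | cons x xs ih =>
    rw [PySem.Set.ofList_cons]
    exact List.Sublist.cons₂ x (List.Sublist.trans (List.filter_sublist) ih)

theorem pvRank_keys : pvRank.keys = pvFieldOrder := by decide

theorem pvRank_contains_iff (k : String) : pvRank.contains k = true ↔ k ∈ pvFieldOrder := by
  rw [PySem.Dict.contains_iff_mem_keys, pvRank_keys]

theorem pvRank_getD_lt : ∀ k ∈ pvFieldOrder,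
    pvRank.getD k 0 < (pvFieldOrder.length : Int) ∧ 0 ≤ pvRank.getD k 0 := by decide

theorem pvRank_inj_on : ∀ a ∈ pvFieldOrder, ∀ b ∈ pvFieldOrder,
    pvRank.getD a 0 = pvRank.getD b 0 → a = b := by decide

theorem pvRank_pairwise : pvFieldOrder.Pairwise
    (fun a b => pvRank.getD a 0 < pvRank.getD b 0) := by decide

theorem pvKeyB_canon (k : String) (h : k ∈ pvFieldOrder) :
    pvKeyB k = toLex (pvRank.getD k 0, "") := by
  have : pvRank.contains k = true := (pvRank_contains_iff k).2 h
  simp [pvKeyB, this]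

theorem pvKeyB_extra (k : String) (h : k ∉ pvFieldOrder) :
    pvKeyB k = toLex ((pvFieldOrder.length : Int), k) := by
  have : pvRank.contains k = false := by
    cases hco : pvRank.contains k
    · rfl
    · exact absurd ((pvRank_contains_iff k).1 hco) h
  simp [pvKeyB, this]

theorem pvKeyB_inj : Function.Injective pvKeyB := by
  intro a b h
  by_cases ha : a ∈ pvFieldOrder <;> by_cases hb : b ∈ pvFieldOrder
  · rw [pvKeyB_canon a ha, pvKeyB_canon b hb] at h
    have h' := congrArg (fun x => (ofLex x).1) h
    exact pvRank_inj_on a ha b hb h'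
  · rw [pvKeyB_canon a ha, pvKeyB_extra b hb] at h
    have h' := congrArg (fun x => (ofLex x).1) h
    exact absurd h' (ne_of_lt (pvRank_getD_lt a ha).1)
  · rw [pvKeyB_extra a ha, pvKeyB_canon b hb] at h
    have h' := congrArg (fun x => (ofLex x).1) h
    exact absurd h'.symm (ne_of_lt (pvRank_getD_lt b hb).1)
  · rw [pvKeyB_extra a ha, pvKeyB_extra b hb] at h
    exact congrArg (fun x => (ofLex x).2) h

-- the central list identity: A's key order equals B's key order
theorem pv_main (ks : List String) :
    PySem.Set.update (pvFieldOrder.filter (fun f => ks.contains f))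
        (PySem.List.sorted ks (fun k => k) false)
      = PySem.Set.ofList (PySem.List.sorted ks pvKeyB false) := by
  have hFOnd : pvFieldOrder.Nodup := by decide
  rw [PySem.Set.update_eq_append_filter]
  set canon := pvFieldOrder.filter (fun f => ks.contains f) with hcanon
  set sk := PySem.List.sorted ks (fun k => k) false with hsk
  set extras := List.filter (fun y => !canon.contains y) (PySem.Set.ofList sk) with hextras
  set R := PySem.Set.ofList (PySem.List.sorted ks pvKeyB false) with hR
  have hcanon_mem : ∀ x, x ∈ canon ↔ x ∈ pvFieldOrder ∧ x ∈ ks := by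
    intro x; rw [hcanon]; simp [List.mem_filter]
  have hextras_mem : ∀ x, x ∈ extras ↔ x ∈ ks ∧ x ∉ canon := by
    intro x; rw [hextras]
    simp [List.mem_filter, PySem.Set.mem_ofList, hsk, PySem.List.mem_sorted]
  have hextras_not_FO : ∀ x ∈ extras, x ∉ pvFieldOrder := by
    intro x hx hFO
    rcases (hextras_mem x).1 hx with ⟨hks, hnc⟩
    exact hnc ((hcanon_mem x).2 ⟨hFO, hks⟩)
  have hcanon_nd : canon.Nodup := hFOnd.filter _
  have hextras_nd : extras.Nodup := (PySem.Set.nodup_ofList sk).filter _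
  have hL_nd : (canon ++ extras).Nodup := by
    rw [List.nodup_append]
    refine ⟨hcanon_nd, hextras_nd, ?_⟩
    intro x hx y hy heq
    exact ((hextras_mem y).1 hy).2 (heq ▸ hx)
  have hR_nd : R.Nodup := PySem.Set.nodup_ofList _
  have hR_mem : ∀ x, x ∈ R ↔ x ∈ ks := by
    intro x; rw [hR]; simp [PySem.Set.mem_ofList, PySem.List.mem_sorted]
  have hmem : ∀ x, x ∈ canon ++ extras ↔ x ∈ R := by
    intro x
    rw [List.mem_append, hR_mem, hcanon_mem, hextras_mem]
    constructor
    · rintro (⟨_, h⟩ | ⟨h, _⟩) <;> exact h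
    · intro hks
      by_cases hFO : x ∈ pvFieldOrder
      · exact Or.inl ⟨hFO, hks⟩
      · refine Or.inr ⟨hks, fun hc => hFO ((hcanon_mem x).1 hc).1⟩
  have hperm : (canon ++ extras).Perm R := (List.perm_ext_iff_of_nodup hL_nd hR_nd).2 hmem
  -- both sides are ≤-sorted under pvKeyB
  have hR_pw : R.Pairwise (fun a b => pvKeyB a ≤ pvKeyB b) :=
    (PySem.List.sorted_pairwise ks pvKeyB).sublist (pv_ofList_sublist _)
  have hcanon_pw : canon.Pairwise (fun a b => pvKeyB a ≤ pvKeyB b) := by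
    have hFO_pw : pvFieldOrder.Pairwise (fun a b => pvKeyB a ≤ pvKeyB b) := by
      refine pvRank_pairwise.imp_of_mem ?_
      intro a b ha hb hlt
      rw [pvKeyB_canon a ha, pvKeyB_canon b hb, Prod.Lex.toLex_le_toLex]
      exact Or.inl hlt
    exact hFO_pw.sublist (List.filter_sublist)
  have hextras_pw : extras.Pairwise (fun a b => pvKeyB a ≤ pvKeyB b) := by
    have hsk_pw : sk.Pairwise (fun a b : String => a ≤ b) :=
      PySem.List.sorted_pairwise ks (fun k => k)
    have h1 : extras.Pairwise (fun a b : String => a ≤ b) :=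
      (hsk_pw.sublist (pv_ofList_sublist _)).sublist (List.filter_sublist)
    refine h1.imp_of_mem ?_
    intro a b ha hb hab
    rw [pvKeyB_extra a (hextras_not_FO a ha), pvKeyB_extra b (hextras_not_FO b hb),
      Prod.Lex.toLex_le_toLex]
    exact Or.inr ⟨rfl, hab⟩
  have hcross : ∀ a ∈ canon, ∀ b ∈ extras, pvKeyB a ≤ pvKeyB b := by
    intro a ha b hb
    rw [pvKeyB_canon a ((hcanon_mem a).1 ha).1, pvKeyB_extra b (hextras_not_FO b hb),
      Prod.Lex.toLex_le_toLex]
    exact Or.inl (pvRank_getD_lt a ((hcanon_mem a).1 ha).1).1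
  have hL_pw : (canon ++ extras).Pairwise (fun a b => pvKeyB a ≤ pvKeyB b) := by
    rw [List.pairwise_append]
    exact ⟨hcanon_pw, hextras_pw, hcross⟩
  exact PySem.List.eq_of_perm_of_pairwise_le_of_injective pvKeyB pvKeyB_inj hperm hL_pw hR_pw

-- ===== VERDICT (by name: the statement is the Claim_ definition above) =====
theorem ordered_fingerprint_py_spec : Claim_equal_ordered_fingerprint_py := by
  intro data _
  unfold Spec_ordered_fingerprint_py ordered_fingerprint_py ordered_fingerprint_py_alt
  simp only []
  set d := PySem.Dict.ofList data with hd
  -- A's first loop: fold the guarded insert over the filtered field list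
  rw [PySem.List.foldl_if_eq_foldl_filter (p := fun key => d.contains key)
    (f := fun (o : PySem.Dict String String) key => o.insert key (d.getD key ""))]
  set canonD := pvFieldOrder.filter (fun key => d.contains key) with hcanonD
  have hcanonD_nd : canonD.Nodup := (by decide : pvFieldOrder.Nodup).filter _
  have h1 : (canonD.foldl (fun o k => o.insert k (d.getD k "")) PySem.Dict.empty).items
      = canonD.map (fun k => (k, d.getD k "")) := by
    rw [pv_items_foldl_insert (fun k => d.getD k "") canonD [] PySem.Dict.empty List.nodup_nil (by rfl)]
    rw [PySem.Set.update_nil_left, PySem.Set.ofList_eq_self_of_nodup canonD hcanonD_nd]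
  -- A's second loop
  rw [pv_items_foldl_insert_cond (fun k => d.getD k "") _ canonD _ hcanonD_nd h1]
  -- B's sort: sorted2 is sorted under pvKeyB
  rw [pv_sorted2_eq_sorted_lex]
  have hkeyB : (fun x => toLex ((if pvRank.contains x then pvRank.getD x 0 else (pvFieldOrder.length : Int)),
      (if pvRank.contains x then "" else x))) = pvKeyB := by
    funext x; rfl
  rw [hkeyB]
  -- B's comprehension
  rw [pv_items_foldl_insert (fun k => d.getD k "") _ [] PySem.Dict.empty List.nodup_nil (by rfl)]
  rw [PySem.Set.update_nil_left]
  -- the two key orders coincide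
  have hcontains : canonD = pvFieldOrder.filter (fun f => d.keys.contains f) := by
    rw [hcanonD]
    refine List.filter_congr ?_
    intro x _
    rw [Bool.eq_iff_iff, PySem.Dict.contains_iff_mem_keys]
    simp
  rw [hcontains, pv_main d.keys]
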